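-- pv_equiv track=rewrite | github.com/ratataque/advent_of_code | day_22/day_22.py | go_forward
-- ===== SOURCE A (Python) =====
-- def go_forward(start: tuple, grid: list, direction: tuple, step: int):
--     x, y  = start
--     dx, dy = direction
--     for i in range(step):
--         x += dx
--         y += dy
--         if ((0 <= y < len(grid)) and (0 <= x < len(grid[y]))) and grid[y][x] != " ":
--             if grid[y][x] == "#":
--                 x -= dx
--                 y -= dy
--                 return (x, y)
--         else:
--             x -= dx
--             y -= dy
--             orix = x
--             oriy = y
--             while (0 <= y < len(grid)) and (0 <= x < len(grid[y])) and grid[y][x] != " ":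
--                 x -= dx
--                 y -= dy
--             x += dx
--             y += dy
--             if grid[y][x] == "#":
--                 return (orix, oriy)
--
--     return (x, y)
-- ===== SOURCE B (Python) =====
-- def go_forward(start: tuple, grid: list, direction: tuple, step: int):
--     # Cycle-detecting walker: memoize visited positions and fast-forward the
--     # remaining steps through the detected cycle instead of walking them all.
--     dx, dy = direction
--
--     def valid(px, py):
--         return 0 <= py < len(grid) and 0 <= px < len(grid[py]) and grid[py][px] != " "
--
--     def succ(p):
--         nx, ny = p[0] + dx, p[1] + dy
--         if valid(nx, ny):
--             return (nx, ny)
--         nx, ny = p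
--         while valid(nx - dx, ny - dy):
--             nx -= dx
--             ny -= dy
--         return (nx, ny)
--
--     pos = start
--     seen = {}
--     trail = []
--     i = 0
--     while i < step:
--         if pos in seen:
--             j = seen[pos]
--             period = i - j
--             rem = (step - i) % period
--             return trail[j + rem]
--         seen[pos] = i
--         trail.append(pos)
--         q = succ(pos)
--         if grid[q[1]][q[0]] == "#":
--             return pos
--         pos = q
--         i += 1
--     return pos
-- ===== Notes on version B (the rewrite author's own statement) =====
-- stated objective: alternative
-- what changed: B replaces A's step-by-step walk (which re-scans backward across the segment on every wrap) by a cycle-detecting walker: it memoizes every visited position with its step index in a dict, and on the first revisit fast-forwards the remaining steps modulo the cycle length and reads the answer off the recorded trail, bounding the work by the number of distinct reachable cells instead of by step.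
-- outside the precondition, e.g. on go_forward((0, -1), ['ab'], (1, 0), 1): A returns (1, -1), B returns (0, -1)
import Mathlib
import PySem

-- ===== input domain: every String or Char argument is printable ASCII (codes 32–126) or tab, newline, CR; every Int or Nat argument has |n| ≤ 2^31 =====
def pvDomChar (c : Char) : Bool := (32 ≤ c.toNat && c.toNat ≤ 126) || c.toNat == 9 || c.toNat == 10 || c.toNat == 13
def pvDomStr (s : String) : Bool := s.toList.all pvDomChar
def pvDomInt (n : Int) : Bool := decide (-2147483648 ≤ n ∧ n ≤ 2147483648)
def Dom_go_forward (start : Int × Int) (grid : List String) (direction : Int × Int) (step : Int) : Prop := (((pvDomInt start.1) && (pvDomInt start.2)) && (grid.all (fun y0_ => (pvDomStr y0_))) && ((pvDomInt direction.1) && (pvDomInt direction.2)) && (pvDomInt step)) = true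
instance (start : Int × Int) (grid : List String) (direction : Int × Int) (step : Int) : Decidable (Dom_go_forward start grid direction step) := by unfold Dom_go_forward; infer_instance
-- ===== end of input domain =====

-- B replaces A's step-by-step walk by a cycle-detecting walker (dict of visited
-- positions + trail, fast-forwarding the remaining steps modulo the cycle length).

-- Shared accessors: both Pythons read grid[y][x] and test the same bounds/blank condition.
-- pvRow grid y = grid[y] (as code points); pvAt grid x y = grid[y][x] with Python's
-- negative-index wraparound (the default ' ' is only reached where Python raises
-- IndexError, which Pre_ excludes).
def pvRow (grid : List String) (y : Int) : List Char :=
  ((PySem.List.pyGet? grid y).getD "").toList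

def pvAt (grid : List String) (x y : Int) : Char :=
  (PySem.List.pyGet? (pvRow grid y) x).getD ' '

-- the condition `0 <= y < len(grid) and 0 <= x < len(grid[y]) and grid[y][x] != " "`
def pvValid (grid : List String) (x y : Int) : Bool :=
  decide (0 ≤ y ∧ y < (grid.length : Int)) &&
  (decide (0 ≤ x ∧ x < ((pvRow grid y).length : Int)) && (pvAt grid x y != ' '))

-- fuel for the backward wrap scans; always sufficient (proved in pvScan_stop below)
def pvMaxRow (grid : List String) : Nat :=
  grid.foldl (fun m s => max m s.toList.length) 0

def pvFuel (grid : List String) : Nat := grid.length + pvMaxRow grid + 2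

-- ===== PORT A =====
-- A's inner `while … : x -= dx; y -= dy` followed by the final `x += dx; y += dy`
-- (the +d is applied by the caller); fuel-guarded for totality only.
def pvScanA (grid : List String) (dx dy : Int) : Nat → Int → Int → Int × Int
  | 0, x, y => (x, y)
  | f + 1, x, y => if pvValid grid x y then pvScanA grid dx dy f (x - dx) (y - dy) else (x, y)

-- A's `for i in range(step)` body, step for step
def pvLoopA (grid : List String) (dx dy : Int) : Nat → Int → Int → Int × Int
  | 0, x, y => (x, y)
  | n + 1, x, y =>
    let x1 := x + dx
    let y1 := y + dy
    if pvValid grid x1 y1 then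
      if pvAt grid x1 y1 == '#' then (x, y) else pvLoopA grid dx dy n x1 y1
    else
      -- x -= dx; y -= dy (back to ori); backward while-scan; then forward one step
      let r := pvScanA grid dx dy (pvFuel grid) x y
      let x3 := r.1 + dx
      let y3 := r.2 + dy
      if pvAt grid x3 y3 == '#' then (x, y) else pvLoopA grid dx dy n x3 y3

def go_forward (start : Int × Int) (grid : List String) (direction : Int × Int) (step : Int) : Int × Int :=
  pvLoopA grid direction.1 direction.2 step.toNat start.1 start.2

-- ===== PORT B =====
-- Source B's `while valid(nx - dx, ny - dy): nx -= dx; ny -= dy` (fuel-guarded for totality)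
def pvScanB (grid : List String) (dx dy : Int) : Nat → Int → Int → Int × Int
  | 0, x, y => (x, y)
  | f + 1, x, y => if pvValid grid (x - dx) (y - dy) then pvScanB grid dx dy f (x - dx) (y - dy) else (x, y)

-- Source B's succ helper
def pvSucc (grid : List String) (dx dy : Int) (p : Int × Int) : Int × Int :=
  let nx := p.1 + dx
  let ny := p.2 + dy
  if pvValid grid nx ny then (nx, ny) else pvScanB grid dx dy (pvFuel grid) p.1 p.2

-- Source B's `while i < step` loop over (pos, seen, trail); fuel = step - i, for totality
def pvLoopB (grid : List String) (dx dy step : Int) :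
    Nat → Int → Int × Int → PySem.Dict (Int × Int) Int → List (Int × Int) → Int × Int
  | 0, _, pos, _, _ => pos
  | f + 1, i, pos, seen, trail =>
    if i < step then
      match seen.get? pos with
      | some j =>
        let period := i - j
        let rem := PySem.Int.mod (step - i) period
        (PySem.List.pyGet? trail (j + rem)).getD pos
      | none =>
        let q := pvSucc grid dx dy pos
        if pvAt grid q.1 q.2 == '#' then pos
        else pvLoopB grid dx dy step f (i + 1) q (seen.insert pos i) (trail ++ [pos])
    else pos

def go_forward_alt (start : Int × Int) (grid : List String) (direction : Int × Int) (step : Int) : Int × Int :=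
  pvLoopB grid direction.1 direction.2 step step.toNat 0 start PySem.Dict.empty []

-- ===== PRECONDITION & SPEC =====
-- Pre_ excludes inputs with step > 0 whose start cell is off the grid or a blank:
-- there A either raises IndexError or, through Python's negative-index wraparound,
-- returns an accidental value (see the cite in the claim).
def Pre_go_forward (start : Int × Int) (grid : List String) (direction : Int × Int) (step : Int) : Prop :=
  step ≤ 0 ∨ pvValid grid start.1 start.2 = true

instance (start : Int × Int) (grid : List String) (direction : Int × Int) (step : Int) : Decidable (Pre_go_forward start grid direction step) := by unfold Pre_go_forward; infer_instance

def pvWitness_go_forward : (Int × Int) × List String × (Int × Int) × Int :=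
  ((1, 0), ["..#", ".#"], (1, 0), 3)

def Spec_go_forward (start : Int × Int) (grid : List String) (direction : Int × Int) (step : Int) (out : Int × Int) : Prop := out = go_forward_alt start grid direction step
instance (start : Int × Int) (grid : List String) (direction : Int × Int) (step : Int) (out : Int × Int) : Decidable (Spec_go_forward start grid direction step out) := by unfold Spec_go_forward; infer_instance

-- ===== CLAIM (what is proved, stated in full; the proofs are below) =====
def Claim_equal_go_forward : Prop := ∀ (start : Int × Int) (grid : List String) (direction : Int × Int) (step : Int), Dom_go_forward start grid direction step → Pre_go_forward start grid direction step → Spec_go_forward start grid direction step (go_forward start grid direction step)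

-- ===== LEMMAS AND PROOFS =====

-- the common one-step successor both programs compute, iterated
def pvOrbit (grid : List String) (dx dy : Int) (p0 : Int × Int) (k : Nat) : Int × Int :=
  (pvSucc grid dx dy)^[k] p0

-- reference walker: iterate succ, stopping at a wall
def pvIter (grid : List String) (dx dy : Int) : Nat → Int × Int → Int × Int
  | 0, p => p
  | n + 1, p =>
    let q := pvSucc grid dx dy p
    if pvAt grid q.1 q.2 == '#' then p else pvIter grid dx dy n q

theorem pvScanA_not_valid (grid : List String) (dx dy : Int) (f : Nat) (x y : Int)
    (h : ¬ pvValid grid x y = true) : pvScanA grid dx dy f x y = (x, y) := by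
  cases f <;> simp [pvScanA, h]

theorem pvScanB_valid (grid : List String) (dx dy : Int) (f : Nat) (x y : Int)
    (h : pvValid grid x y = true) :
    pvValid grid (pvScanB grid dx dy f x y).1 (pvScanB grid dx dy f x y).2 = true := by
  induction f generalizing x y with
  | zero => simpa [pvScanB] using h
  | succ f ih =>
    by_cases h2 : pvValid grid (x - dx) (y - dy) = true
    · simpa [pvScanB, h2] using ih (x - dx) (y - dy) h2
    · simpa [pvScanB, h2] using h

theorem pvScan_eq (grid : List String) (dx dy : Int) (f : Nat) (x y : Int)
    (hv : pvValid grid x y = true)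
    (hstop : ∃ k : Nat, k < f ∧ ¬ pvValid grid (x - ((k : Int) + 1) * dx) (y - ((k : Int) + 1) * dy) = true) :
    ((pvScanA grid dx dy f x y).1 + dx, (pvScanA grid dx dy f x y).2 + dy) = pvScanB grid dx dy f x y := by
  induction f generalizing x y with
  | zero => obtain ⟨k, hk, _⟩ := hstop; omega
  | succ f ih =>
    by_cases h2 : pvValid grid (x - dx) (y - dy) = true
    · obtain ⟨k, hk, hnv⟩ := hstop
      have hk1 : 1 ≤ k := by
        rcases Nat.eq_zero_or_pos k with h0 | h
        · exfalso; subst h0; simp only [Nat.cast_zero, zero_add, one_mul] at hnv; exact hnv h2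
        · exact h
      have hstop' : ∃ k' : Nat, k' < f ∧
          ¬ pvValid grid ((x - dx) - ((k' : Int) + 1) * dx) ((y - dy) - ((k' : Int) + 1) * dy) = true := by
        refine ⟨k - 1, by omega, ?_⟩
        have hx : (x - dx) - ((((k - 1 : Nat)) : Int) + 1) * dx = x - ((k : Int) + 1) * dx := by
          have : (((k - 1 : Nat)) : Int) = (k : Int) - 1 := by omega
          rw [this]; ring
        have hy : (y - dy) - ((((k - 1 : Nat)) : Int) + 1) * dy = y - ((k : Int) + 1) * dy := by
          have : (((k - 1 : Nat)) : Int) = (k : Int) - 1 := by omega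
          rw [this]; ring
        rw [hx, hy]; exact hnv
      have hA : pvScanA grid dx dy (f + 1) x y = pvScanA grid dx dy f (x - dx) (y - dy) := by
        simp [pvScanA, hv]
      have hB : pvScanB grid dx dy (f + 1) x y = pvScanB grid dx dy f (x - dx) (y - dy) := by
        simp [pvScanB, h2]
      rw [hA, hB]; exact ih (x - dx) (y - dy) h2 hstop'
    · have hA : pvScanA grid dx dy (f + 1) x y = (x - dx, y - dy) := by
        simp only [pvScanA, hv, if_true]
        exact pvScanA_not_valid grid dx dy f (x - dx) (y - dy) h2
      simp [pvScanB, h2, hA]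

theorem pvFoldlMax_mono (l : List String) (a : Nat) :
    a ≤ l.foldl (fun m t => max m t.toList.length) a := by
  induction l generalizing a with
  | nil => simp
  | cons hd tl ih => exact le_trans (le_max_left _ _) (ih _)

theorem pvRow_len_le_aux (l : List String) (a : Nat) (s : String) (hs : s ∈ l) :
    s.toList.length ≤ l.foldl (fun m t => max m t.toList.length) a := by
  induction l generalizing a with
  | nil => cases hs
  | cons hd tl ih =>
    rcases List.mem_cons.mp hs with h | h
    · subst h
      exact le_trans (le_max_right a _) (pvFoldlMax_mono tl _)
    · exact ih _ h

theorem pvRow_len_le (grid : List String) (y : Int) (h0 : 0 ≤ y) (h1 : y < (grid.length : Int)) :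
    (pvRow grid y).length ≤ pvMaxRow grid := by
  have hlt : y.toNat < grid.length := by omega
  have hg : PySem.List.pyGet? grid y = some grid[y.toNat] := by
    rw [PySem.List.pyGet?_of_nonneg grid h0]
    simp [List.getElem?_eq_getElem hlt]
  simp only [pvRow, pvMaxRow, hg, Option.getD_some]
  exact pvRow_len_le_aux grid 0 _ (List.getElem_mem hlt)

theorem pvValid_bounds (grid : List String) (x y : Int) (h : pvValid grid x y = true) :
    0 ≤ y ∧ y < (grid.length : Int) ∧ 0 ≤ x ∧ x < ((pvRow grid y).length : Int) := by
  simp only [pvValid, Bool.and_eq_true, decide_eq_true_eq] at h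
  exact ⟨h.1.1, h.1.2, h.2.1.1, h.2.1.2⟩

theorem pvScan_stop (grid : List String) (dx dy x y : Int)
    (hv : pvValid grid x y = true)
    (hnv : ¬ pvValid grid (x + dx) (y + dy) = true) :
    ∃ k : Nat, k < pvFuel grid ∧ ¬ pvValid grid (x - ((k : Int) + 1) * dx) (y - ((k : Int) + 1) * dy) = true := by
  by_contra hc
  push Not at hc
  have hF : 1 ≤ pvFuel grid := by unfold pvFuel; omega
  have hq := hc (pvFuel grid - 1) (by omega)
  have hcast : (((pvFuel grid - 1 : Nat)) : Int) + 1 = (pvFuel grid : Int) := by omega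
  rw [hcast] at hq
  set F : Int := (pvFuel grid : Int) with hFdef
  have hFval : F = (grid.length : Int) + (pvMaxRow grid : Int) + 2 := by
    rw [hFdef]; unfold pvFuel; push_cast; ring
  obtain ⟨hy0, hy1, hx0, hx1⟩ := pvValid_bounds grid x y hv
  by_cases hdy0 : dy = 0
  · by_cases hdx0 : dx = 0
    · subst hdy0; subst hdx0
      exact hnv (by simpa using hv)
    · subst hdy0
      have hq' : pvValid grid (x - F * dx) y = true := by simpa using hq
      obtain ⟨_, _, hqx0, hqx1⟩ := pvValid_bounds grid _ _ hq'
      have hrow : ((pvRow grid y).length : Int) ≤ (pvMaxRow grid : Int) := by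
        exact_mod_cast pvRow_len_le grid y hy0 hy1
      rcases lt_or_gt_of_ne hdx0 with hneg | hpos
      · nlinarith
      · nlinarith
  · obtain ⟨hqy0, hqy1, _, _⟩ := pvValid_bounds grid _ _ hq
    rcases lt_or_gt_of_ne hdy0 with hneg | hpos
    · nlinarith
    · nlinarith

theorem pvSucc_valid (grid : List String) (dx dy : Int) (p : Int × Int)
    (h : pvValid grid p.1 p.2 = true) :
    pvValid grid (pvSucc grid dx dy p).1 (pvSucc grid dx dy p).2 = true := by
  by_cases h2 : pvValid grid (p.1 + dx) (p.2 + dy) = true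
  · simpa [pvSucc, h2] using h2
  · simpa [pvSucc, h2] using pvScanB_valid grid dx dy (pvFuel grid) p.1 p.2 h

-- A's loop computes the reference walk
theorem pvLoopA_eq_iter (grid : List String) (dx dy : Int) (n : Nat) (x y : Int)
    (hv : pvValid grid x y = true) :
    pvLoopA grid dx dy n x y = pvIter grid dx dy n (x, y) := by
  induction n generalizing x y with
  | zero => rfl
  | succ n ih =>
    by_cases hb : pvValid grid (x + dx) (y + dy) = true
    · have hs : pvSucc grid dx dy (x, y) = (x + dx, y + dy) := by simp [pvSucc, hb]
      by_cases hw : pvAt grid (x + dx) (y + dy) = '#'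
      · simp [pvLoopA, pvIter, hb, hs, hw]
      · simp [pvLoopA, pvIter, hb, hs, hw, ih _ _ hb]
    · have hstop := pvScan_stop grid dx dy x y hv hb
      have heq := pvScan_eq grid dx dy (pvFuel grid) x y hv hstop
      have hs : pvSucc grid dx dy (x, y) =
          ((pvScanA grid dx dy (pvFuel grid) x y).1 + dx, (pvScanA grid dx dy (pvFuel grid) x y).2 + dy) := by
        simp only [pvSucc, hb, if_false, Bool.false_eq_true]
        exact heq.symm
      have hvr := pvSucc_valid grid dx dy (x, y) hv
      rw [hs] at hvr
      by_cases hw : pvAt grid ((pvScanA grid dx dy (pvFuel grid) x y).1 + dx) ((pvScanA grid dx dy (pvFuel grid) x y).2 + dy) = '#'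
      · simp [pvLoopA, pvIter, hb, hs, hw]
      · simp [pvLoopA, pvIter, hb, hs, hw, ih _ _ hvr]

theorem pvOrbit_succ (grid : List String) (dx dy : Int) (p0 : Int × Int) (k : Nat) :
    pvOrbit grid dx dy p0 (k + 1) = pvSucc grid dx dy (pvOrbit grid dx dy p0 k) := by
  simp [pvOrbit, Function.iterate_succ_apply']

theorem pvOrbit_shift (grid : List String) (dx dy : Int) (p0 : Int × Int) (jN iN : Nat)
    (hlt : jN < iN) (heq : pvOrbit grid dx dy p0 jN = pvOrbit grid dx dy p0 iN) (m : Nat) :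
    pvOrbit grid dx dy p0 (jN + m + (iN - jN)) = pvOrbit grid dx dy p0 (jN + m) := by
  induction m with
  | zero =>
    have h0 : jN + 0 + (iN - jN) = iN := by omega
    rw [h0]; exact heq.symm
  | succ m ih =>
    have h1 : jN + (m + 1) + (iN - jN) = (jN + m + (iN - jN)) + 1 := by omega
    have h2 : jN + (m + 1) = (jN + m) + 1 := by omega
    rw [h1, h2, pvOrbit_succ, pvOrbit_succ, ih]

theorem pvOrbit_mod (grid : List String) (dx dy : Int) (p0 : Int × Int) (jN iN : Nat)
    (hlt : jN < iN) (heq : pvOrbit grid dx dy p0 jN = pvOrbit grid dx dy p0 iN) (m : Nat) :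
    pvOrbit grid dx dy p0 (jN + m) = pvOrbit grid dx dy p0 (jN + m % (iN - jN)) := by
  induction m using Nat.strong_induction_on with
  | _ m ih =>
    by_cases hm : m < iN - jN
    · rw [Nat.mod_eq_of_lt hm]
    · have hT : 0 < iN - jN := by omega
      have hm' : m - (iN - jN) < m := by omega
      have h1 : jN + m = jN + (m - (iN - jN)) + (iN - jN) := by omega
      rw [h1, pvOrbit_shift grid dx dy p0 jN iN hlt heq, ih _ hm']
      congr 1
      have := Nat.mod_eq_sub_mod (by omega : iN - jN ≤ m)
      omega

theorem pvNoWallEver (grid : List String) (dx dy : Int) (p0 : Int × Int) (jN iN : Nat)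
    (hlt : jN < iN) (heq : pvOrbit grid dx dy p0 jN = pvOrbit grid dx dy p0 iN)
    (hwall : ∀ m : Nat, 1 ≤ m → m ≤ iN → ¬ pvAt grid (pvOrbit grid dx dy p0 m).1 (pvOrbit grid dx dy p0 m).2 = '#')
    (m : Nat) (hm : 1 ≤ m) :
    ¬ pvAt grid (pvOrbit grid dx dy p0 m).1 (pvOrbit grid dx dy p0 m).2 = '#' := by
  by_cases hle : m ≤ iN
  · exact hwall m hm hle
  · have hsplit : m = jN + (m - jN) := by omega
    rw [hsplit, pvOrbit_mod grid dx dy p0 jN iN hlt heq]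
    set r := (m - jN) % (iN - jN) with hr
    have hrlt : r < iN - jN := Nat.mod_lt _ (by omega)
    by_cases h0 : jN + r = 0
    · have hj0 : jN = 0 := by omega
      have hr0 : r = 0 := by omega
      rw [h0]
      have h00 : pvOrbit grid dx dy p0 0 = pvOrbit grid dx dy p0 iN := by
        rw [← hj0]; exact heq
      rw [h00]
      exact hwall iN (by omega) (by omega)
    · exact hwall (jN + r) (by omega) (by omega)

theorem pvIter_noWall (grid : List String) (dx dy : Int) (p0 : Int × Int)
    (hnw : ∀ m : Nat, 1 ≤ m → ¬ pvAt grid (pvOrbit grid dx dy p0 m).1 (pvOrbit grid dx dy p0 m).2 = '#')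
    (f : Nat) : ∀ k : Nat, pvIter grid dx dy f (pvOrbit grid dx dy p0 k) = pvOrbit grid dx dy p0 (k + f) := by
  induction f with
  | zero => intro k; rfl
  | succ f ih =>
    intro k
    have hq : pvSucc grid dx dy (pvOrbit grid dx dy p0 k) = pvOrbit grid dx dy p0 (k + 1) :=
      (pvOrbit_succ grid dx dy p0 k).symm
    have hw := hnw (k + 1) (by omega)
    have hkf : k + 1 + f = k + (f + 1) := by omega
    simp only [pvIter, hq]
    rw [if_neg (by simpa using hw), ih (k + 1), hkf]

-- B's loop computes the reference walk
theorem pvLoopB_eq_iter (grid : List String) (dx dy step : Int) (p0 : Int × Int) (hstep : 0 < step)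
    (f iN : Nat) (seen : PySem.Dict (Int × Int) Int) (trail : List (Int × Int))
    (hfuel : f + iN = step.toNat)
    (hseen : ∀ p j, seen.get? p = some j → ∃ jN : Nat, j = (jN : Int) ∧ jN < iN ∧ pvOrbit grid dx dy p0 jN = p)
    (htrail : trail = (List.range iN).map (pvOrbit grid dx dy p0))
    (hwall : ∀ m : Nat, 1 ≤ m → m ≤ iN → ¬ pvAt grid (pvOrbit grid dx dy p0 m).1 (pvOrbit grid dx dy p0 m).2 = '#') :
    pvLoopB grid dx dy step f (iN : Int) (pvOrbit grid dx dy p0 iN) seen trail = pvIter grid dx dy f (pvOrbit grid dx dy p0 iN) := by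
  induction f generalizing iN seen trail with
  | zero => rfl
  | succ f ih =>
    have hguard : (iN : Int) < step := by omega
    rcases hget : seen.get? (pvOrbit grid dx dy p0 iN) with _ | j
    · -- not seen: record and advance
      by_cases hw : pvAt grid (pvSucc grid dx dy (pvOrbit grid dx dy p0 iN)).1 (pvSucc grid dx dy (pvOrbit grid dx dy p0 iN)).2 = '#'
      · simp only [pvLoopB, if_pos hguard, hget]
        rw [if_pos (by simpa using hw)]
        simp only [pvIter, ← pvOrbit_succ]
        rw [if_pos (by rw [pvOrbit_succ]; simpa using hw)]
      · have hstep1 : pvSucc grid dx dy (pvOrbit grid dx dy p0 iN) = pvOrbit grid dx dy p0 (iN + 1) :=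
          (pvOrbit_succ grid dx dy p0 iN).symm
        have hrec := ih (iN + 1) (seen.insert (pvOrbit grid dx dy p0 iN) (iN : Int)) (trail ++ [pvOrbit grid dx dy p0 iN])
          (by omega)
          (by
            intro p j hj
            rw [PySem.Dict.get?_insert] at hj
            by_cases hp : p = pvOrbit grid dx dy p0 iN
            · rw [if_pos hp] at hj
              exact ⟨iN, (Option.some.inj hj).symm, by omega, hp.symm⟩
            · rw [if_neg hp] at hj
              obtain ⟨jN, h1, h2, h3⟩ := hseen p j hj
              exact ⟨jN, h1, by omega, h3⟩)
          (by rw [htrail, List.range_succ, List.map_append]; rfl)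
          (by
            intro m hm1 hm2
            rcases Nat.lt_or_ge m (iN + 1) with hlt | hge
            · exact hwall m hm1 (by omega)
            · have hmeq : m = iN + 1 := by omega
              rw [hmeq, ← hstep1]
              exact hw)
        simp only [pvLoopB, if_pos hguard, hget]
        rw [if_neg (by simpa using hw)]
        have hcast1 : (iN : Int) + 1 = ((iN + 1 : Nat) : Int) := by push_cast; ring
        rw [hcast1, hstep1, hrec]
        simp only [pvIter, ← pvOrbit_succ]
        rw [if_neg (by rw [pvOrbit_succ]; simpa using hw)]
    · -- seen: fast-forward through the cycle
      obtain ⟨jN, hjcast, hjlt, hjorb⟩ := hseen _ _ hget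
      have heqo : pvOrbit grid dx dy p0 jN = pvOrbit grid dx dy p0 iN := hjorb
      have hTpos : (0 : Int) < (iN : Int) - (jN : Int) := by omega
      have hnw := pvNoWallEver grid dx dy p0 jN iN hjlt heqo hwall
      -- right side: walk runs to the end
      have hiter : pvIter grid dx dy (f + 1) (pvOrbit grid dx dy p0 iN) = pvOrbit grid dx dy p0 (iN + (f + 1)) :=
        pvIter_noWall grid dx dy p0 hnw (f + 1) iN
      -- left side: the table lookup
      have hmodpos := PySem.Int.mod_nonneg (step - (iN : Int)) hTpos
      have hmodlt := PySem.Int.mod_lt (step - (iN : Int)) hTpos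
      set rem : Int := PySem.Int.mod (step - (iN : Int)) ((iN : Int) - (jN : Int)) with hrem
      have hremN : rem = ((rem.toNat : Nat) : Int) := by omega
      have hidx : jN + rem.toNat < iN := by omega
      have hlookup : PySem.List.pyGet? trail ((jN : Int) + rem) = some (pvOrbit grid dx dy p0 (jN + rem.toNat)) := by
        have : (jN : Int) + rem = ((jN + rem.toNat : Nat) : Int) := by omega
        rw [this, PySem.List.pyGet?_natCast, htrail]
        rw [List.getElem?_eq_getElem (by simpa using hidx)]
        simp
      -- the two agree: remaining steps mod the period
      have hmodeq : rem.toNat = (step.toNat - iN) % (iN - jN) := by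
        have h1 : PySem.Int.mod (step - (iN : Int)) ((iN : Int) - (jN : Int)) = (step - (iN : Int)) % ((iN : Int) - (jN : Int)) :=
          PySem.Int.mod_eq_emod_of_pos hTpos
        have h2 : (step - (iN : Int)) = ((step.toNat - iN : Nat) : Int) := by omega
        have h3 : ((iN : Int) - (jN : Int)) = (((iN - jN : Nat)) : Int) := by omega
        rw [h1, h2, h3] at hrem
        have : rem = (((step.toNat - iN) % (iN - jN) : Nat) : Int) := by
          rw [hrem]; exact (Int.natCast_mod _ _).symm
        omega
      have horb : pvOrbit grid dx dy p0 (jN + rem.toNat) = pvOrbit grid dx dy p0 (iN + (f + 1)) := by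
        have h1 := pvOrbit_mod grid dx dy p0 jN iN hjlt heqo (iN + (f + 1) - jN)
        have hsplit : jN + (iN + (f + 1) - jN) = iN + (f + 1) := by omega
        have hd : (iN + (f + 1) - jN) % (iN - jN) = rem.toNat := by
          have hdd : iN + (f + 1) - jN = (step.toNat - iN) + (iN - jN) := by omega
          rw [hdd, Nat.add_mod_right]
          exact hmodeq.symm
        rw [hsplit, hd] at h1
        exact h1.symm
      simp only [pvLoopB, if_pos hguard, hget]
      rw [hjcast, hiter, ← horb, ← hrem, hlookup]
      rfl

-- ===== VERDICT (by name: the statement is the Claim_ definition above) =====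
theorem go_forward_spec : Claim_equal_go_forward := by
  intro start grid direction step _ hpre
  unfold Spec_go_forward go_forward go_forward_alt
  by_cases hs : step ≤ 0
  · have h0 : step.toNat = 0 := by omega
    rw [h0]; rfl
  · have hv : pvValid grid start.1 start.2 = true := by
      rcases hpre with h | h
      · omega
      · exact h
    have hB : pvLoopB grid direction.1 direction.2 step step.toNat ((0 : Nat) : Int)
        (pvOrbit grid direction.1 direction.2 start 0) PySem.Dict.empty []
        = pvIter grid direction.1 direction.2 step.toNat (pvOrbit grid direction.1 direction.2 start 0) := by
      apply pvLoopB_eq_iter grid direction.1 direction.2 step start (by omega) step.toNat 0 PySem.Dict.empty []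
      · omega
      · intro p j hj; rw [PySem.Dict.get?_empty] at hj; cases hj
      · rfl
      · intro m h1 h2; omega
    have horb0 : pvOrbit grid direction.1 direction.2 start 0 = start := rfl
    rw [horb0] at hB
    simp only [Nat.cast_zero] at hB
    rw [hB, pvLoopA_eq_iter grid direction.1 direction.2 step.toNat start.1 start.2 hv]
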